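-- pv_equiv track=rewrite | github.com/hyunwook-kim-dhk/branch_name_maker | main.py | branchname_maker
-- ===== SOURCE A (Python) =====
-- def branchname_maker(ticket_no, msg):
-- 	if not msg or msg == '':
-- 		raise Error
-- 	change_list = [
-- 		(' ', '-'),
-- 		('_', '-'),
-- 		(':', '-'),
-- 		("'", '"'),
-- 		('/', ''),
-- 		('(', ''),
-- 		(')', ''),
-- 		('[', ''),
-- 		(']', ''),
-- 		('{', ''),
-- 		('}', '')
-- 	]
-- 	for change_from, change_to in change_list:
-- 		msg = msg.replace(change_from, change_to)
-- 	return (ticket_no + '-' + msg).lower()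
-- ===== SOURCE B (Python) =====
-- def branchname_maker(ticket_no, msg):
-- 	if not msg or msg == '':
-- 		raise Error
-- 	MAP = {' ': '-', '_': '-', ':': '-', "'": '"',
-- 		'/': '', '(': '', ')': '', '[': '', ']': '', '{': '', '}': ''}
-- 	out = []
-- 	for ch in ticket_no:
-- 		out.append(ch.lower())
-- 	out.append('-')
-- 	for ch in msg:
-- 		out.append(MAP[ch] if ch in MAP else ch.lower())
-- 	return ''.join(out)
-- ===== Notes on version B (the rewrite author's own statement) =====
-- stated objective: alternative
-- what changed: Replaces A's 11 sequential whole-string replace passes followed by a final .lower() with one fused character-by-character accumulator loop that maps/deletes punctuation and lowercases each character as it is emitted (no replace, no final lower pass).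
import Mathlib
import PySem

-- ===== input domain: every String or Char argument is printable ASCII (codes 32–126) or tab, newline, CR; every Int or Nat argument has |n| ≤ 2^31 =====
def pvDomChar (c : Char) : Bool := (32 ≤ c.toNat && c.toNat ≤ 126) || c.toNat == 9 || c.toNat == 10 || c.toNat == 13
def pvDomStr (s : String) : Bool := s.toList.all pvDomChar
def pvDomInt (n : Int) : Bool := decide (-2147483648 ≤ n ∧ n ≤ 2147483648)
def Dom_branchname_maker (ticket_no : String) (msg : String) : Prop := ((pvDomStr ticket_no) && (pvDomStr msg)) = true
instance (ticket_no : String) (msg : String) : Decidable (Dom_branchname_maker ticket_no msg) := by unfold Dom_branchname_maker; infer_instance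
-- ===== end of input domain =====

-- B replaces A's 11 sequential whole-string replace passes + final .lower() with
-- one fused per-character accumulator pass (map/delete punctuation, lowercase as
-- emitted); equivalence of the RETURN value is proved on Pre_ (msg nonempty).

-- ===== PORT A =====
-- the change_list literal of A, as (old, new) pairs of char lists
def bnChangeList : List (List Char × List Char) :=
  [([' '], ['-']),
    (['_'], ['-']),
    ([':'], ['-']),
    (['\''], ['"']),
    (['/'], []),
    (['('], []),
    ([')'], []),
    (['['], []),
    ([']'], []),
    (['{'], []),
    (['}'], [])]

-- port of A: the guard raises on msg = '' (excluded by Pre_); the for-loop over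
-- change_list is a foldl of Chars.replace; '+' is list append, .lower() is Chars.lower
def branchname_maker (ticket_no : String) (msg : String) : String :=
  let m := bnChangeList.foldl (fun (m : List Char) (p : List Char × List Char) => PySem.Chars.replace m p.1 p.2) msg.toList
  String.ofList (PySem.Chars.lower (ticket_no.toList ++ '-' :: m))

-- ===== PORT B =====
-- B's per-character mapping: MAP[ch] if ch in MAP else ch.lower()
def bnMap (c : Char) : List Char :=
  if c = ' ' then ['-'] else if c = '_' then ['-'] else if c = ':' then ['-']
  else if c = '\'' then ['"']
  else if c = '/' then [] else if c = '(' then [] else if c = ')' then []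
  else if c = '[' then [] else if c = ']' then [] else if c = '{' then [] else if c = '}' then []
  else [PySem.Chars.lowerChar c]

-- port of B: one fused pass — lowercased ticket chars, '-', then per-char mapped msg;
-- ''.join of the accumulated pieces is the concatenation (map / flatMap)
def branchname_maker_alt (ticket_no : String) (msg : String) : String :=
  String.ofList (ticket_no.toList.map PySem.Chars.lowerChar ++ '-' :: msg.toList.flatMap bnMap)

-- ===== PRECONDITION & SPEC =====
-- A (and B) raise NameError on an empty msg; Pre_ excludes exactly that input
def Pre_branchname_maker (ticket_no : String) (msg : String) : Prop := msg ≠ ""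
instance (ticket_no : String) (msg : String) : Decidable (Pre_branchname_maker ticket_no msg) := by unfold Pre_branchname_maker; infer_instance
def pvWitness_branchname_maker : String × String := ("PROJ-42", "Fix [urgent] bug: don't crash (again)")
def Spec_branchname_maker (ticket_no : String) (msg : String) (out : String) : Prop := out = branchname_maker_alt ticket_no msg
instance (ticket_no : String) (msg : String) (out : String) : Decidable (Spec_branchname_maker ticket_no msg out) := by unfold Spec_branchname_maker; infer_instance

-- ===== CLAIM (what is proved, stated in full; the proofs are below) =====
def Claim_equal_branchname_maker : Prop := ∀ (ticket_no : String) (msg : String), Dom_branchname_maker ticket_no msg → Pre_branchname_maker ticket_no msg → Spec_branchname_maker ticket_no msg (branchname_maker ticket_no msg)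

-- ===== LEMMAS AND PROOFS =====

-- Chars.replace with a single-char pattern is a per-character flatMap
lemma bn_go_single (c : Char) (t : List Char) :
    ∀ (l : List Char) (fuel : Nat) (acc : List Char), l.length ≤ fuel →
      PySem.Chars.replace.go [c] t fuel l acc
        = acc.reverse ++ l.flatMap (fun x => if x = c then t else [x]) := by
  intro l
  induction l with
  | nil =>
    intro fuel acc _
    cases fuel <;> simp [PySem.Chars.replace.go]
  | cons c' l ih =>
    intro fuel acc h
    cases fuel with
    | zero => simp at h
    | succ fuel =>
      rw [PySem.Chars.replace.go]
      by_cases hc : c = c'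
      · subst hc
        simp [List.isPrefixOf, ih _ _ (by simpa using h)]
      · simp [List.isPrefixOf, hc, ih _ _ (by simpa using h), Ne.symm hc]

lemma bn_replace_single (s : List Char) (c : Char) (t : List Char) :
    PySem.Chars.replace s [c] t = s.flatMap (fun x => if x = c then t else [x]) := by
  rw [PySem.Chars.replace]
  simp [bn_go_single c t s s.length [] (le_refl _)]

-- on one character, A's 11 composed substitutions followed by lowercasing
-- compute B's fused table
lemma bn_point (c : Char) : ((((((((((((if c = ' ' then ['-'] else [c]).flatMap (fun x => if x = '_' then ['-'] else [x])).flatMap (fun x => if x = ':' then ['-'] else [x])).flatMap (fun x => if x = '\'' then ['"'] else [x])).flatMap (fun x => if x = '/' then [] else [x])).flatMap (fun x => if x = '(' then [] else [x])).flatMap (fun x => if x = ')' then [] else [x])).flatMap (fun x => if x = '[' then [] else [x])).flatMap (fun x => if x = ']' then [] else [x])).flatMap (fun x => if x = '{' then [] else [x])).flatMap (fun x => if x = '}' then [] else [x])).map PySem.Chars.lowerChar) = bnMap c := by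
  by_cases h : c = ' ' ∨ c = '_' ∨ c = ':' ∨ c = '\'' ∨ c = '/' ∨ c = '(' ∨ c = ')' ∨ c = '[' ∨ c = ']' ∨ c = '{' ∨ c = '}'
  · rcases h with h|h|h|h|h|h|h|h|h|h|h <;> subst h <;> rfl
  · push Not at h
    obtain ⟨h1, h2, h3, h4, h5, h6, h7, h8, h9, h10, h11⟩ := h
    simp [bnMap, h1, h2, h3, h4, h5, h6, h7, h8, h9, h10, h11]

-- A's 11 composed flatMaps over the whole string, then lowercasing, is B's one
-- fused flatMap of bnMap
lemma bn_chain (s : List Char) : ((((((((((((s.flatMap (fun x => if x = ' ' then ['-'] else [x])).flatMap (fun x => if x = '_' then ['-'] else [x])).flatMap (fun x => if x = ':' then ['-'] else [x])).flatMap (fun x => if x = '\'' then ['"'] else [x])).flatMap (fun x => if x = '/' then [] else [x])).flatMap (fun x => if x = '(' then [] else [x])).flatMap (fun x => if x = ')' then [] else [x])).flatMap (fun x => if x = '[' then [] else [x])).flatMap (fun x => if x = ']' then [] else [x])).flatMap (fun x => if x = '{' then [] else [x])).flatMap (fun x => if x = '}' then [] else [x])).map PySem.Chars.lowerChar) = s.flatMap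 bnMap := by
  induction s with
  | nil => simp
  | cons c s ih =>
    simp only [List.flatMap_cons, List.flatMap_append, List.map_append, ih]
    rw [bn_point c]

-- ===== VERDICT (by name: the statement is the Claim_ definition above) =====
theorem branchname_maker_spec : Claim_equal_branchname_maker := by
  intro ticket_no msg _ _
  unfold Spec_branchname_maker branchname_maker branchname_maker_alt bnChangeList
  simp only [List.foldl_cons, List.foldl_nil, bn_replace_single, PySem.Chars.lower,
    List.map_append, List.map_cons]
  rw [bn_chain]
  rfl
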